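-- pv_equiv track=rewrite | github.com/mahsa-asadi8/DivGetBatch | Maintenance-Codes/distance_final2.py | max_distance2
-- ===== SOURCE A (Python) =====
-- def max_distance2(cluster1, cluster2):
--     maxdis = -1
--     item = None
--     for i in cluster1:
--         for j in cluster2:
--             dis = (i[0]- j[0])**2 + (i[1] - j[1])**2
--             if maxdis < dis:
--                 maxdis = dis
--                 item = (i,j)
--     return maxdis
-- ===== SOURCE B (Python) =====
-- def max_distance2(cluster1, cluster2):
--     # Divide and conquer over cluster1: the farthest-pair squared distance of a
--     # segment is the max of its halves; a single point's best is a max-reduction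
--     # over cluster2 (default -1, which is also the answer for empty input).
--     def far(lo, hi):
--         if hi - lo == 0:
--             return -1
--         if hi - lo == 1:
--             x, y = cluster1[lo]
--             return max(((x - u) ** 2 + (y - v) ** 2 for (u, v) in cluster2), default=-1)
--         mid = (lo + hi) // 2
--         return max(far(lo, mid), far(mid, hi))
--     return far(0, len(cluster1))
-- ===== Notes on version B (the rewrite author's own statement) =====
-- stated objective: alternative
-- what changed: Replaces A's nested accumulator loops (running max plus argmax tracking) by a divide-and-conquer recursion over cluster1 that combines segment results with max, each single point handled by one max-reduction over cluster2 with default -1.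
import Mathlib
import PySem

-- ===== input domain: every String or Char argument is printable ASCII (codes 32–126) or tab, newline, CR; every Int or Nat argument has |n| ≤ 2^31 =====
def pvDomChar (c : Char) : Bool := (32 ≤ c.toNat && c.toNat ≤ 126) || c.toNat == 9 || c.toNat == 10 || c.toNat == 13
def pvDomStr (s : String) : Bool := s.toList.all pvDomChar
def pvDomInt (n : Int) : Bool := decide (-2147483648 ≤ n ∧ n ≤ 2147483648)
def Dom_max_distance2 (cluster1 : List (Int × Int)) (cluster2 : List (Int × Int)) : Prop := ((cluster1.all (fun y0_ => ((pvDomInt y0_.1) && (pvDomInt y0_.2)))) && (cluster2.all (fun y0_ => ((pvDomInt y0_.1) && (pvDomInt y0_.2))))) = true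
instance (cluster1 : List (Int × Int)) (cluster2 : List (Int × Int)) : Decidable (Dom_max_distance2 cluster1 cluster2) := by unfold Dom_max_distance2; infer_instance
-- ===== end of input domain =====

-- B replaces A's nested accumulator loops by a divide-and-conquer max over cluster1 segments (alternative decomposition, same asymptotic cost).
-- ===== PORT A =====
def max_distance2 (cluster1 : List (Int × Int)) (cluster2 : List (Int × Int)) : Int :=
  (cluster1.foldl (fun st i =>
      cluster2.foldl (fun st j =>
        let dis := (i.1 - j.1) ^ 2 + (i.2 - j.2) ^ 2
        if st.1 < dis then (dis, some (i, j)) else st) st)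
    ((-1 : Int), (none : Option ((Int × Int) × (Int × Int))))).1

-- ===== PORT B =====
-- max(... for (u,v) in cluster2, default=-1): Python's builtin max as a left fold from the first element
def pvFar1 (x y : Int) (cluster2 : List (Int × Int)) : Int :=
  match cluster2.map (fun p => (x - p.1) ^ 2 + (y - p.2) ^ 2) with
  | [] => -1
  | d :: ds => ds.foldl max d

-- far(lo, hi) of Source B; cluster1[lo] is always in range when called (1 = hi - lo ≤ length), so getD is exact there
def pvFar (cluster1 : List (Int × Int)) (cluster2 : List (Int × Int)) (lo hi : Nat) : Int :=
  if hiEq0 : hi - lo = 0 then -1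
  else if hiEq1 : hi - lo = 1 then
    let p := cluster1.getD lo (0, 0)
    pvFar1 p.1 p.2 cluster2
  else
    let mid := (lo + hi) / 2
    max (pvFar cluster1 cluster2 lo mid) (pvFar cluster1 cluster2 mid hi)
termination_by hi - lo
decreasing_by
  · omega
  · omega

def max_distance2_alt (cluster1 : List (Int × Int)) (cluster2 : List (Int × Int)) : Int :=
  pvFar cluster1 cluster2 0 cluster1.length

-- ===== PRECONDITION & SPEC =====
def Spec_max_distance2 (cluster1 : List (Int × Int)) (cluster2 : List (Int × Int)) (out : Int) : Prop := out = max_distance2_alt cluster1 cluster2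
instance (cluster1 : List (Int × Int)) (cluster2 : List (Int × Int)) (out : Int) : Decidable (Spec_max_distance2 cluster1 cluster2 out) := by unfold Spec_max_distance2; infer_instance

-- ===== CLAIM (what is proved, stated in full; the proofs are below) =====
def Claim_equal_max_distance2 : Prop := ∀ (cluster1 : List (Int × Int)) (cluster2 : List (Int × Int)), Dom_max_distance2 cluster1 cluster2 → Spec_max_distance2 cluster1 cluster2 (max_distance2 cluster1 cluster2)

-- ===== LEMMAS AND PROOFS =====

-- the per-point best: max distance² from i to cluster2, -1 if cluster2 empty
def pvInner (c2 : List (Int × Int)) (i : (Int × Int)) : Int :=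
  c2.foldl (fun m j => max m ((i.1 - j.1) ^ 2 + (i.2 - j.2) ^ 2)) (-1)

-- the common normal form: max of per-point bests over a list, seeded with -1
def pvF (c2 : List (Int × Int)) (l : List (Int × Int)) : Int :=
  l.foldl (fun m i => max m (pvInner c2 i)) (-1)

theorem foldl_max_hoist {α : Type} (f : α → Int) (l : List α) (s t : Int) :
    l.foldl (fun m x => max m (f x)) (max s t) = max s (l.foldl (fun m x => max m (f x)) t) := by
  induction l generalizing t with
  | nil => simp
  | cons x xs ih =>
    simp only [List.foldl_cons, max_assoc]
    exact ih (max t (f x))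

theorem foldl_max_ge {α : Type} (f : α → Int) (l : List α) (s : Int) :
    s ≤ l.foldl (fun m x => max m (f x)) s := by
  induction l generalizing s with
  | nil => simp
  | cons x xs ih => exact le_trans (le_max_left _ _) (ih (max s (f x)))

theorem pvInner_ge : ∀ (c2 : List (Int × Int)) (i : Int × Int), (-1 : Int) ≤ pvInner c2 i :=
  fun c2 i => foldl_max_ge _ c2 (-1)

theorem pvF_ge (c2 l : List (Int × Int)) : (-1 : Int) ≤ pvF c2 l :=
  foldl_max_ge _ l (-1)

-- A's inner loop is a max-fold (the argmax component does not affect the first projection)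
theorem portA_inner (c2 : List (Int × Int)) (i : Int × Int)
    (st : Int × Option ((Int × Int) × (Int × Int))) :
    (c2.foldl (fun st j =>
        let dis := (i.1 - j.1) ^ 2 + (i.2 - j.2) ^ 2
        if st.1 < dis then (dis, some (i, j)) else st) st).1
      = c2.foldl (fun m j => max m ((i.1 - j.1) ^ 2 + (i.2 - j.2) ^ 2)) st.1 := by
  induction c2 generalizing st with
  | nil => rfl
  | cons j js ih =>
    simp only [List.foldl_cons]
    rw [ih]
    congr 1
    split <;> simp <;> omega

-- threading the accumulator through the inner loop = combining per-point bests with max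
theorem portA_fold (c2 c1 : List (Int × Int)) (st : Int × Option ((Int × Int) × (Int × Int)))
    (hst : -1 ≤ st.1) :
    (c1.foldl (fun st i =>
        c2.foldl (fun st j =>
          let dis := (i.1 - j.1) ^ 2 + (i.2 - j.2) ^ 2
          if st.1 < dis then (dis, some (i, j)) else st) st) st).1
      = c1.foldl (fun m i => max m (pvInner c2 i)) st.1 := by
  induction c1 generalizing st with
  | nil => rfl
  | cons i is ih =>
    simp only [List.foldl_cons]
    have h1 : (c2.foldl (fun st j =>
        let dis := (i.1 - j.1) ^ 2 + (i.2 - j.2) ^ 2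
        if st.1 < dis then (dis, some (i, j)) else st) st).1 = max st.1 (pvInner c2 i) := by
      have := portA_inner c2 i st
      have hmax : st.1 = max st.1 (-1) := by omega
      rw [this, pvInner]
      conv_lhs => rw [hmax]
      exact foldl_max_hoist _ c2 st.1 (-1)
    have h2 := ih (c2.foldl (fun st j =>
        let dis := (i.1 - j.1) ^ 2 + (i.2 - j.2) ^ 2
        if st.1 < dis then (dis, some (i, j)) else st) st) (by rw [h1]; omega)
    rw [h2, h1]

theorem portA_eq_pvF (c1 c2 : List (Int × Int)) : max_distance2 c1 c2 = pvF c2 c1 := by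
  unfold max_distance2 pvF
  exact portA_fold c2 c1 ((-1 : Int), none) (by simp)

-- pvFar1 is pvInner (Python max from the first element equals the -1-seeded fold: distances are ≥ 0)
theorem foldl_max_map {α : Type} (f : α → Int) (l : List α) (d : Int) :
    (l.map f).foldl max d = l.foldl (fun m x => max m (f x)) d := by
  induction l generalizing d with
  | nil => rfl
  | cons x xs ih => simp only [List.map_cons, List.foldl_cons]; exact ih (max d (f x))

theorem pvFar1_eq_pvInner (x y : Int) (c2 : List (Int × Int)) :
    pvFar1 x y c2 = pvInner c2 (x, y) := by
  cases c2 with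
  | nil => rfl
  | cons j js =>
    unfold pvFar1 pvInner
    simp only [List.map_cons, List.foldl_cons, foldl_max_map]
    have hd : max (-1 : Int) ((x - j.1) ^ 2 + (y - j.2) ^ 2) = (x - j.1) ^ 2 + (y - j.2) ^ 2 := by
      have h1 : (0:Int) ≤ (x - j.1) ^ 2 := sq_nonneg _
      have h2 : (0:Int) ≤ (y - j.2) ^ 2 := sq_nonneg _
      omega
    rw [hd]

-- pvF over an append splits as a max
theorem pvF_append (c2 a b : List (Int × Int)) :
    pvF c2 (a ++ b) = max (pvF c2 a) (pvF c2 b) := by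
  unfold pvF
  rw [List.foldl_append]
  have h : pvF c2 a = max (pvF c2 a) (-1) := by have := pvF_ge c2 a; omega
  conv_lhs => rw [show a.foldl (fun m i => max m (pvInner c2 i)) (-1) = pvF c2 a from rfl, h]
  exact foldl_max_hoist _ b (pvF c2 a) (-1)

-- the D&C recursion computes pvF on the segment [lo, hi)
theorem pvFar_eq_pvF_fuel (n : Nat) : ∀ (c1 c2 : List (Int × Int)) (lo hi : Nat),
    hi - lo ≤ n → lo ≤ hi → hi ≤ c1.length →
    pvFar c1 c2 lo hi = pvF c2 ((c1.drop lo).take (hi - lo)) := by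
  induction n with
  | zero =>
    intro c1 c2 lo hi hfuel hle hhi
    have h0 : hi - lo = 0 := by omega
    rw [pvFar, dif_pos h0, h0]
    rfl
  | succ n ih =>
    intro c1 c2 lo hi hfuel hle hhi
    rw [pvFar]
    by_cases h0 : hi - lo = 0
    · rw [dif_pos h0, h0]; rfl
    · rw [dif_neg h0]
      by_cases h1 : hi - lo = 1
      · rw [dif_pos h1, h1]
        have hlo : lo < c1.length := by omega
        have hseg : (c1.drop lo).take 1 = [c1[lo]] := by
          rw [List.take_one, List.head?_drop]
          simp [hlo]
        rw [hseg]
        have hgetD : c1.getD lo ((0 : Int), (0 : Int)) = c1[lo] := List.getD_eq_getElem _ _ hlo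
        simp only [hgetD, pvFar1_eq_pvInner]
        show pvInner c2 (c1[lo].1, c1[lo].2) = max (-1) (pvInner c2 c1[lo])
        rw [show (c1[lo].1, c1[lo].2) = c1[lo] from rfl]
        have := pvInner_ge c2 c1[lo]
        omega
      · rw [dif_neg h1]
        show max (pvFar c1 c2 lo ((lo + hi) / 2)) (pvFar c1 c2 ((lo + hi) / 2) hi)
          = pvF c2 ((c1.drop lo).take (hi - lo))
        have h2 : 2 ≤ hi - lo := by omega
        have hmid1 : lo < (lo + hi) / 2 := by omega
        have hmid2 : (lo + hi) / 2 < hi := by omega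
        have hsplit : (c1.drop lo).take (hi - lo)
            = (c1.drop lo).take ((lo + hi) / 2 - lo) ++ (c1.drop ((lo + hi) / 2)).take (hi - (lo + hi) / 2) := by
          have harith : hi - lo = ((lo + hi) / 2 - lo) + (hi - (lo + hi) / 2) := by omega
          have hmideq : lo + ((lo + hi) / 2 - lo) = (lo + hi) / 2 := by omega
          rw [harith, List.take_add, List.drop_drop, hmideq]
        rw [hsplit, pvF_append,
          ih c1 c2 lo ((lo + hi) / 2) (by omega) (by omega) (by omega),
          ih c1 c2 ((lo + hi) / 2) hi (by omega) (by omega) hhi]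

theorem portB_eq_pvF (c1 c2 : List (Int × Int)) : max_distance2_alt c1 c2 = pvF c2 c1 := by
  unfold max_distance2_alt
  rw [pvFar_eq_pvF_fuel c1.length c1 c2 0 c1.length (by omega) (Nat.zero_le _) (le_refl _)]
  simp

-- ===== VERDICT (by name: the statement is the Claim_ definition above) =====
theorem max_distance2_spec : Claim_equal_max_distance2 := by
  intro c1 c2 _
  unfold Spec_max_distance2
  rw [portA_eq_pvF, portB_eq_pvF]
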